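-- pv_equiv track=rewrite | github.com/aboremasx0x-boop/phytologic-ai-hackathon | app.py | parse_general_disease_class_name
-- ===== SOURCE A (Python) =====
-- from typing import Optional, List, Dict, Any, Tuple
--
-- ARABIC_PLANT_NAMES = {
--     "Apple": "تفاح",
--     "Blueberry": "توت أزرق",
--     "Cherry": "كرز",
--     "Corn": "ذرة",
--     "Grape": "عنب",
--     "Orange": "برتقال",
--     "Peach": "خوخ",
--     "Pepper": "فلفل",
--     "Potato": "بطاطس",
--     "Raspberry": "توت العليق",
--     "Soybean": "فول الصويا",
--     "Squash": "قرع",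
--     "Strawberry": "فراولة",
--     "Tomato": "طماطم",
--     "unknown": "غير معروف",
-- }
--
-- ARABIC_DISEASE_NAMES = {
--     "healthy": "سليم",
--     "Early_blight": "اللفحة المبكرة",
--     "Late_blight": "اللفحة المتأخرة",
--     "Leaf_Mold": "عفن الأوراق",
--     "Septoria_leaf_spot": "تبقع السبتوريا",
--     "Target_Spot": "تبقع الهدف",
--     "Tomato_mosaic_virus": "فيروس موزاييك الطماطم",
--     "Tomato_Yellow_Leaf_Curl_Virus": "فيروس تجعد واصفرار أوراق الطماطم",
--     "Bacterial_spot": "تبقع بكتيري",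
--     "Spider_mites_Two_spotted_spider_mite": "العنكبوت الأحمر",
--     "Common_rust": "الصدأ الشائع",
--     "Northern_Leaf_Blight": "لفحة الأوراق الشمالية",
--     "Cercospora_leaf_spot_Gray_leaf_spot": "تبقع سركسبورا / التبقع الرمادي",
--     "Leaf_blight_Isariopsis_Leaf_Spot": "لفحة الأوراق",
--     "Black_rot": "العفن الأسود",
--     "Esca_Black_Measles": "إسكا / الحصبة السوداء",
--     "Apple_scab": "جرب التفاح",
--     "Powdery_mildew": "البياض الدقيقي",
--     "Leaf_scorch": "احتراق الأوراق",
--     "unknown": "غير معروف",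
-- }
--
-- PLANT_PREFIXES = [p for p in ARABIC_PLANT_NAMES.keys() if p != "unknown"]
--
-- def clean_label(label: str) -> str:
--     label = label.replace("___", "_").replace(",", "").replace("(", "").replace(")", "").replace(" ", "_")
--     while "__" in label:
--         label = label.replace("__", "_")
--     return label.strip("_")
--
-- def parse_general_disease_class_name(class_name: str) -> Tuple[str, str, str, str]:
--     label = clean_label(class_name)
--
--     detected_plant = None
--     for prefix in PLANT_PREFIXES:
--         if label.startswith(prefix + "_") or label == prefix:
--             detected_plant = prefix
--             break
--
--     if detected_plant is None:
--         return "unknown", "unknown", "غير معروف", "غير معروف"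
--
--     disease_part = label[len(detected_plant):].strip("_")
--     disease_en = "healthy" if disease_part == "" or disease_part.lower() == "healthy" else disease_part
--
--     return (
--         detected_plant,
--         disease_en,
--         ARABIC_PLANT_NAMES.get(detected_plant, detected_plant),
--         ARABIC_DISEASE_NAMES.get(disease_en, disease_en.replace("_", " "))
--     )
-- ===== SOURCE B (Python) =====
-- ARABIC_PLANT_NAMES = {
--     "Apple": "تفاح",
--     "Blueberry": "توت أزرق",
--     "Cherry": "كرز",
--     "Corn": "ذرة",
--     "Grape": "عنب",
--     "Orange": "برتقال",
--     "Peach": "خوخ",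
--     "Pepper": "فلفل",
--     "Potato": "بطاطس",
--     "Raspberry": "توت العليق",
--     "Soybean": "فول الصويا",
--     "Squash": "قرع",
--     "Strawberry": "فراولة",
--     "Tomato": "طماطم",
--     "unknown": "غير معروف",
-- }
--
-- ARABIC_DISEASE_NAMES = {
--     "healthy": "سليم",
--     "Early_blight": "اللفحة المبكرة",
--     "Late_blight": "اللفحة المتأخرة",
--     "Leaf_Mold": "عفن الأوراق",
--     "Septoria_leaf_spot": "تبقع السبتوريا",
--     "Target_Spot": "تبقع الهدف",
--     "Tomato_mosaic_virus": "فيروس موزاييك الطماطم",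
--     "Tomato_Yellow_Leaf_Curl_Virus": "فيروس تجعد واصفرار أوراق الطماطم",
--     "Bacterial_spot": "تبقع بكتيري",
--     "Spider_mites_Two_spotted_spider_mite": "العنكبوت الأحمر",
--     "Common_rust": "الصدأ الشائع",
--     "Northern_Leaf_Blight": "لفحة الأوراق الشمالية",
--     "Cercospora_leaf_spot_Gray_leaf_spot": "تبقع سركسبورا / التبقع الرمادي",
--     "Leaf_blight_Isariopsis_Leaf_Spot": "لفحة الأوراق",
--     "Black_rot": "العفن الأسود",
--     "Esca_Black_Measles": "إسكا / الحصبة السوداء",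
--     "Apple_scab": "جرب التفاح",
--     "Powdery_mildew": "البياض الدقيقي",
--     "Leaf_scorch": "احتراق الأوراق",
--     "unknown": "غير معروف",
-- }
--
-- def parse_general_disease_class_name(class_name):
--     s = class_name.replace("___", "_").replace(",", "").replace("(", "").replace(")", "").replace(" ", "_")
--     tokens = [t for t in s.split("_") if t]
--     if not tokens or tokens[0] == "unknown" or tokens[0] not in ARABIC_PLANT_NAMES:
--         return "unknown", "unknown", "غير معروف", "غير معروف"
--     plant, rest = tokens[0], tokens[1:]
--     disease = "_".join(rest)
--     if disease == "" or disease.lower() == "healthy":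
--         disease = "healthy"
--     return plant, disease, ARABIC_PLANT_NAMES.get(plant, plant), ARABIC_DISEASE_NAMES.get(disease, disease.replace("_", " "))
-- ===== Notes on version B (the rewrite author's own statement) =====
-- stated objective: simpler
-- what changed: Replaces clean_label's replace-until-fixpoint while loop plus strip and the prefix-scan loop over PLANT_PREFIXES by one token pipeline: split on underscores, drop empty tokens, take the first token as the plant (checked by dict membership) and join the remaining tokens as the disease.
import Mathlib
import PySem

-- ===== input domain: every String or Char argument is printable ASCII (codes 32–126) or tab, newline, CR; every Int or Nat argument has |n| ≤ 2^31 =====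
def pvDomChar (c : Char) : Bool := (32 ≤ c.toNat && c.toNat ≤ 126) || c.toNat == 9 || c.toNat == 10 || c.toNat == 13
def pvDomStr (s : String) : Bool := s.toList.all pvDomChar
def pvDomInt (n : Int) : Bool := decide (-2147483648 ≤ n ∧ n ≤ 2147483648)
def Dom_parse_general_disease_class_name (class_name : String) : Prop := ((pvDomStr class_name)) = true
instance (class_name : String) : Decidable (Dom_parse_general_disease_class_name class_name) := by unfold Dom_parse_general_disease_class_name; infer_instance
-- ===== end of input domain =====

-- B replaces clean_label's replace-until-fixpoint loop + strip and the prefix-scan loop by a single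
-- split-on-'_' / drop-empty-tokens pipeline (first token = plant, join of the rest = disease); same return value.

-- ===== PORT A =====
-- module constants (shared context of both Pythons)
def pvPlantDict : PySem.Dict String String := PySem.Dict.ofList [
  ("Apple", "تفاح"), ("Blueberry", "توت أزرق"), ("Cherry", "كرز"), ("Corn", "ذرة"),
  ("Grape", "عنب"), ("Orange", "برتقال"), ("Peach", "خوخ"), ("Pepper", "فلفل"),
  ("Potato", "بطاطس"), ("Raspberry", "توت العليق"), ("Soybean", "فول الصويا"), ("Squash", "قرع"),
  ("Strawberry", "فراولة"), ("Tomato", "طماطم"), ("unknown", "غير معروف")]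

def pvDiseaseDict : PySem.Dict String String := PySem.Dict.ofList [
  ("healthy", "سليم"), ("Early_blight", "اللفحة المبكرة"), ("Late_blight", "اللفحة المتأخرة"),
  ("Leaf_Mold", "عفن الأوراق"), ("Septoria_leaf_spot", "تبقع السبتوريا"), ("Target_Spot", "تبقع الهدف"),
  ("Tomato_mosaic_virus", "فيروس موزاييك الطماطم"), ("Tomato_Yellow_Leaf_Curl_Virus", "فيروس تجعد واصفرار أوراق الطماطم"),
  ("Bacterial_spot", "تبقع بكتيري"), ("Spider_mites_Two_spotted_spider_mite", "العنكبوت الأحمر"),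
  ("Common_rust", "الصدأ الشائع"), ("Northern_Leaf_Blight", "لفحة الأوراق الشمالية"),
  ("Cercospora_leaf_spot_Gray_leaf_spot", "تبقع سركسبورا / التبقع الرمادي"),
  ("Leaf_blight_Isariopsis_Leaf_Spot", "لفحة الأوراق"), ("Black_rot", "العفن الأسود"),
  ("Esca_Black_Measles", "إسكا / الحصبة السوداء"), ("Apple_scab", "جرب التفاح"),
  ("Powdery_mildew", "البياض الدقيقي"), ("Leaf_scorch", "احتراق الأوراق"), ("unknown", "غير معروف")]

def pvPlantPrefixes : List String := (PySem.Dict.keys pvPlantDict).filter (fun p => p ≠ "unknown")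

-- what one pass of label.replace("__", "_") computes (used only for the loop's termination measure)
def pvRep2 : List Char → List Char
  | [] => []
  | [c] => [c]
  | c :: d :: t => if c = '_' ∧ d = '_' then '_' :: pvRep2 t else c :: pvRep2 (d :: t)

theorem pvGo_eq (fuel : Nat) : ∀ (l acc : List Char), l.length ≤ fuel →
    PySem.Chars.replace.go ['_','_'] ['_'] fuel l acc = acc.reverse ++ pvRep2 l := by
  induction fuel with
  | zero =>
    intro l acc h
    have : l = [] := List.eq_nil_of_length_eq_zero (Nat.le_zero.mp h)
    subst this
    rw [PySem.Chars.replace.go.eq_def]; simp [pvRep2]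
  | succ n ih =>
    intro l acc h
    cases l with
    | nil => rw [PySem.Chars.replace.go.eq_def]; simp [pvRep2]
    | cons c t =>
      rw [PySem.Chars.replace.go.eq_def]
      dsimp only
      by_cases hp : (['_','_'] : List Char).isPrefixOf (c :: t) = true
      · rw [if_pos hp]
        obtain ⟨u, hu⟩ := List.isPrefixOf_iff_prefix.mp hp
        cases t with
        | nil => simp at hu
        | cons d t' =>
          simp at hu
          obtain ⟨hc, hd, ht⟩ := hu
          subst hc; subst hd
          have hlen : t'.length ≤ n := by simp at h; omega
          rw [show (List.drop (['_','_'] : List Char).length ('_' :: '_' :: t')) = t' by simp]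
          rw [ih t' (['_'].reverse ++ acc) hlen]
          simp [pvRep2]
      · rw [if_neg hp]
        have hlen : t.length ≤ n := by simp at h; omega
        rw [ih t (c :: acc) hlen]
        cases t with
        | nil => simp [pvRep2]
        | cons d t' =>
          have : ¬ (c = '_' ∧ d = '_') := by
            intro ⟨h1, h2⟩; subst h1; subst h2
            exact hp (by simp [List.isPrefixOf])
          simp [pvRep2, this]

theorem pvReplace_eq_rep2 (l : List Char) :
    PySem.Chars.replace l ['_','_'] ['_'] = pvRep2 l := by
  rw [PySem.Chars.replace]
  simp only [show (['_','_'] : List Char).isEmpty = false from rfl, Bool.false_eq_true, if_false]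
  simpa using pvGo_eq l.length l [] le_rfl

theorem pvRep2_length_le (l : List Char) : (pvRep2 l).length ≤ l.length := by
  induction l using pvRep2.induct with
  | case1 => simp [pvRep2]
  | case2 c => simp [pvRep2]
  | case3 c d t hcd ih => simp [pvRep2, hcd]; omega
  | case4 c d t hcd ih => simp [pvRep2, hcd] at ih ⊢; omega

theorem pvRep2_length_lt (l : List Char) (h : ['_','_'] <:+: l) :
    (pvRep2 l).length < l.length := by
  induction l using pvRep2.induct with
  | case1 => exact absurd h.length_le (by decide)
  | case2 c => exact absurd h.length_le (by simp)
  | case3 c d t hcd ih =>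
    obtain ⟨hc, hd⟩ := hcd
    subst hc; subst hd
    have := pvRep2_length_le t
    simp [pvRep2]; omega
  | case4 c d t hcd ih =>
    rcases List.infix_cons_iff.mp h with hpre | hinf
    · have : c = '_' ∧ d = '_' := by
        obtain ⟨u, hu⟩ := hpre
        simp at hu
        exact ⟨hu.1.symm, hu.2.1.symm⟩
      exact absurd this hcd
    · have := ih hinf
      simp [pvRep2, hcd] at this ⊢
      omega

-- the 'while "__" in label' loop of clean_label
def pvCollapse (s : String) : String :=
  if PySem.Str.isIn "__" s then pvCollapse (PySem.Str.replace s "__" "_") else s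
termination_by s.toList.length
decreasing_by
  rename_i h
  have h' : (['_','_'] : List Char) <:+: s.toList := by
    have := (PySem.Str.isIn_eq "__" s).symm.trans h
    exact (PySem.Chars.isIn_iff_infix _ _).mp this
  simp only [PySem.Str.toList_replace]
  have e1 : ("__" : String).toList = ['_','_'] := by decide
  have e2 : ("_" : String).toList = ['_'] := by decide
  rw [e1, e2, pvReplace_eq_rep2]
  exact pvRep2_length_lt _ h'

def pvCleanLabel (label : String) : String :=
  PySem.Str.stripChars
    (pvCollapse
      (PySem.Str.replace (PySem.Str.replace (PySem.Str.replace (PySem.Str.replace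
        (PySem.Str.replace label "___" "_") "," "") "(" "") ")" "") " " "_"))
    "_"

-- the 'for prefix in PLANT_PREFIXES: … break' loop
def pvFindPlant (label : String) : List String → Option String
  | [] => none
  | p :: ps =>
    if PySem.Str.startswith label (p ++ "_") || label == p then some p
    else pvFindPlant label ps

def parse_general_disease_class_name (class_name : String) : String × String × String × String :=
  let label := pvCleanLabel class_name
  match pvFindPlant label pvPlantPrefixes with
  | none => ("unknown", "unknown", "غير معروف", "غير معروف")
  | some detected =>
    let disease_part := PySem.Str.stripChars (PySem.Str.slice label (some (PySem.Str.len detected)) none) "_"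
    let disease_en := if disease_part == "" || PySem.Str.lower disease_part == "healthy" then "healthy" else disease_part
    (detected, disease_en,
      pvPlantDict.getD detected detected,
      pvDiseaseDict.getD disease_en (PySem.Str.replace disease_en "_" " "))

-- ===== PORT B =====
def parse_general_disease_class_name_alt (class_name : String) : String × String × String × String :=
  let s := PySem.Str.replace (PySem.Str.replace (PySem.Str.replace (PySem.Str.replace
    (PySem.Str.replace class_name "___" "_") "," "") "(" "") ")" "") " " "_"
  let tokens := ((PySem.Str.split? s "_").getD []).filter (fun t => t ≠ "")
  match tokens with
  | [] => ("unknown", "unknown", "غير معروف", "غير معروف")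
  | plant :: rest =>
    if plant == "unknown" || !(pvPlantDict.contains plant) then
      ("unknown", "unknown", "غير معروف", "غير معروف")
    else
      let disease0 := PySem.Str.join "_" rest
      let disease := if disease0 == "" || PySem.Str.lower disease0 == "healthy" then "healthy" else disease0
      (plant, disease,
        pvPlantDict.getD plant plant,
        pvDiseaseDict.getD disease (PySem.Str.replace disease "_" " "))

-- ===== PRECONDITION & SPEC =====
def Spec_parse_general_disease_class_name (class_name : String) (out : String × String × String × String) : Prop := out = parse_general_disease_class_name_alt class_name
instance (class_name : String) (out : String × String × String × String) : Decidable (Spec_parse_general_disease_class_name class_name out) := by unfold Spec_parse_general_disease_class_name; infer_instance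

-- ===== CLAIM (what is proved, stated in full; the proofs are below) =====
def Claim_equal_parse_general_disease_class_name : Prop := ∀ (class_name : String), Dom_parse_general_disease_class_name class_name → Spec_parse_general_disease_class_name class_name (parse_general_disease_class_name class_name)

-- ===== LEMMAS AND PROOFS =====

-- keep-characters predicate of split on '_' (true on non-underscores)
def pvQ : Char → Bool := fun c => !(c == '_')

-- the nonempty '_'-separated tokens of a character list
def pvTok : List Char → List (List Char)
  | [] => []
  | c :: t =>
    if c == '_' then pvTok t
    else (c :: t.takeWhile pvQ) :: pvTok (t.dropWhile pvQ)
termination_by l => l.length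
decreasing_by
  all_goals have := List.length_dropWhile_le (p := pvQ) (l := t)
  all_goals simp
  all_goals omega

-- what Python's label.split('_') computes
def pvSplitU : List Char → List (List Char)
  | [] => [[]]
  | c :: t => if c == '_' then [] :: pvSplitU t else List.modifyHead (c :: ·) (pvSplitU t)

def pvRstrip (l : List Char) : List Char := (List.dropWhile (· == '_') l.reverse).reverse

theorem pvModifyHead_id {α : Type} (l : List α) : List.modifyHead (fun x => x) l = l := by
  cases l <;> rfl

theorem pvDropWhile_shape (t : List Char) :
    List.dropWhile pvQ t = [] ∨ ∃ r, List.dropWhile pvQ t = '_' :: r := by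
  induction t with
  | nil => left; rfl
  | cons c u ih =>
    by_cases hc : c = '_'
    · right; exact ⟨u, by simp [List.dropWhile_cons, pvQ, hc]⟩
    · simpa [List.dropWhile_cons, pvQ, hc] using ih

theorem pvSplitU_append_left (a : List Char) : ∀ b, '_' ∉ a →
    pvSplitU (a ++ b) = List.modifyHead (a ++ ·) (pvSplitU b) := by
  induction a with
  | nil => intro b _; simp [pvModifyHead_id]
  | cons c a' ih =>
    intro b ha
    have hc : ¬ c = '_' := by intro h; exact ha (h ▸ List.mem_cons_self ..)
    have ha' : '_' ∉ a' := fun h => ha (List.mem_cons_of_mem _ h)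
    simp only [List.cons_append, pvSplitU, beq_iff_eq, hc, if_false, ih b ha',
      List.modifyHead_modifyHead]
    rfl

theorem pvGoSplit (fuel : Nat) : ∀ (l cur : List Char) (acc : List (List Char)), l.length < fuel →
    PySem.Chars.splitOn.go ['_'] fuel l cur acc
      = acc.reverse ++ List.modifyHead (cur.reverse ++ ·) (pvSplitU l) := by
  induction fuel with
  | zero => intro l cur acc h; omega
  | succ n ih =>
    intro l cur acc h
    cases l with
    | nil => rw [PySem.Chars.splitOn.go.eq_def]; simp [pvSplitU]
    | cons c t =>
      rw [PySem.Chars.splitOn.go.eq_def]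
      dsimp only
      by_cases hc : c = '_'
      · have hp : (['_'] : List Char).isPrefixOf (c :: t) = true := by
          subst hc; simp [List.isPrefixOf]
        rw [if_pos hp]
        have hlen : t.length < n := by simp at h; omega
        rw [show List.drop (['_'] : List Char).length (c :: t) = t by simp]
        rw [ih t [] (cur.reverse :: acc) hlen]
        subst hc
        simp [pvSplitU, pvModifyHead_id]
      · have hp : ¬ (['_'] : List Char).isPrefixOf (c :: t) = true := by
          simp [List.isPrefixOf]
          exact fun h' => hc h'.symm
        rw [if_neg hp]
        have hlen : t.length < n := by simp at h; omega
        rw [ih t (c :: cur) acc hlen]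
        simp only [pvSplitU, beq_iff_eq, hc, if_false, List.modifyHead_modifyHead,
          List.reverse_cons]
        congr 1
        apply congrArg (fun f => List.modifyHead f (pvSplitU t))
        funext x
        simp

theorem pvSplitOn_eq (l : List Char) : PySem.Chars.splitOn l ['_'] = pvSplitU l := by
  rw [PySem.Chars.splitOn, pvGoSplit (l.length + 1) l [] [] (by omega)]
  simp [pvModifyHead_id]

theorem pvFilter_splitU_aux (n : Nat) : ∀ l : List Char, l.length ≤ n →
    (pvSplitU l).filter (fun t => t ≠ []) = pvTok l := by
  induction n with
  | zero =>
    intro l h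
    have : l = [] := List.eq_nil_of_length_eq_zero (Nat.le_zero.mp h)
    subst this; simp [pvSplitU, pvTok]
  | succ n ih =>
    intro l h
    cases l with
    | nil => simp [pvSplitU, pvTok]
    | cons c t =>
      by_cases hc : c = '_'
      · subst hc
        simp only [pvSplitU, beq_self_eq_true, if_true, pvTok]
        rw [List.filter_cons]
        simp only [ne_eq, not_true_eq_false, decide_false]
        exact ih t (by simp at h; omega)
      · have hdec : List.takeWhile pvQ t ++ List.dropWhile pvQ t = t :=
          List.takeWhile_append_dropWhile
        have htw : '_' ∉ c :: List.takeWhile pvQ t := by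
          intro hm
          rcases List.mem_cons.mp hm with h1 | h1
          · exact hc h1.symm
          · have := List.mem_takeWhile_imp h1
            simp [pvQ] at this
        have hsplit : pvSplitU (c :: t)
            = List.modifyHead ((c :: List.takeWhile pvQ t) ++ ·) (pvSplitU (List.dropWhile pvQ t)) := by
          conv_lhs => rw [show c :: t = (c :: List.takeWhile pvQ t) ++ List.dropWhile pvQ t by
            simp [hdec]]
          exact pvSplitU_append_left _ _ htw
        rw [hsplit]
        rcases pvDropWhile_shape t with hdw | ⟨r, hdw⟩
        · rw [hdw]
          simp only [pvSplitU, List.modifyHead]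
          rw [List.filter_cons]
          simp only [pvTok, beq_iff_eq, hc, if_false, hdw]
          simp [pvTok]
        · rw [hdw]
          simp only [pvSplitU, beq_self_eq_true, if_true, List.modifyHead]
          rw [List.filter_cons]
          have hrlen : r.length ≤ n := by
            have h1 : (List.dropWhile pvQ t).length ≤ t.length := List.length_dropWhile_le ..
            rw [hdw] at h1
            simp at h1 h
            omega
          rw [if_pos (by simp), ih r hrlen]
          simp only [pvTok, beq_iff_eq, hc, if_false, hdw]
          simp [pvTok]

theorem pvFilter_splitU (l : List Char) :
    (pvSplitU l).filter (fun t => t ≠ []) = pvTok l :=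
  pvFilter_splitU_aux l.length l le_rfl

theorem pvRep2_append_left (a : List Char) : ∀ b, '_' ∉ a →
    pvRep2 (a ++ b) = a ++ pvRep2 b := by
  induction a with
  | nil => intro b _; rfl
  | cons c a' ih =>
    intro b ha
    have hc : ¬ c = '_' := fun h => ha (h ▸ List.mem_cons_self ..)
    have ha' : '_' ∉ a' := fun h => ha (List.mem_cons_of_mem _ h)
    rw [List.cons_append]
    cases h : a' ++ b with
    | nil => simp at h; simp [h.1, h.2, pvRep2]
    | cons d u =>
      have hpair : ¬ (c = '_' ∧ d = '_') := fun ⟨h1, _⟩ => hc h1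
      rw [show pvRep2 (c :: d :: u) = c :: pvRep2 (d :: u) by
        simp only [pvRep2]; rw [if_neg hpair]]
      rw [← h, ih b ha']
      rfl

theorem pvRep2_underscore_head (r : List Char) : ∃ x, pvRep2 ('_' :: r) = '_' :: x := by
  cases r with
  | nil => exact ⟨[], rfl⟩
  | cons d r' =>
    by_cases hd : d = '_'
    · subst hd; exact ⟨pvRep2 r', by simp [pvRep2]⟩
    · exact ⟨pvRep2 (d :: r'), by simp [pvRep2, hd]⟩

theorem pvTakeWhile_append_underscore (a : List Char) : ∀ x, '_' ∉ a →
    List.takeWhile pvQ (a ++ '_' :: x) = a ∧ List.dropWhile pvQ (a ++ '_' :: x) = '_' :: x := by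
  induction a with
  | nil => intro x _; constructor <;> simp [List.takeWhile_cons, List.dropWhile_cons, pvQ]
  | cons c a' ih =>
    intro x ha
    have hc : ¬ c = '_' := fun h => ha (h ▸ List.mem_cons_self ..)
    have ha' : '_' ∉ a' := fun h => ha (List.mem_cons_of_mem _ h)
    obtain ⟨h1, h2⟩ := ih x ha'
    constructor
    · simp [List.takeWhile_cons, pvQ, hc, h1]
    · simp [List.dropWhile_cons, pvQ, hc, h2]

theorem pvTok_rep2_aux (n : Nat) : ∀ l : List Char, l.length ≤ n →
    pvTok (pvRep2 l) = pvTok l := by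
  induction n with
  | zero =>
    intro l h
    have : l = [] := List.eq_nil_of_length_eq_zero (Nat.le_zero.mp h)
    subst this; rfl
  | succ n ih =>
    intro l h
    cases l with
    | nil => rfl
    | cons c t =>
      by_cases hc : c = '_'
      · subst hc
        cases t with
        | nil => rfl
        | cons d t' =>
          by_cases hd : d = '_'
          · subst hd
            rw [show pvRep2 ('_' :: '_' :: t') = '_' :: pvRep2 t' by simp [pvRep2]]
            rw [show pvTok ('_' :: pvRep2 t') = pvTok (pvRep2 t') by simp [pvTok]]
            rw [show pvTok ('_' :: '_' :: t') = pvTok t' by simp [pvTok]]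
            exact ih t' (by simp at h; omega)
          · rw [show pvRep2 ('_' :: d :: t') = '_' :: pvRep2 (d :: t') by simp [pvRep2, hd]]
            rw [show pvTok ('_' :: pvRep2 (d :: t')) = pvTok (pvRep2 (d :: t')) by simp [pvTok]]
            rw [show pvTok ('_' :: d :: t') = pvTok (d :: t') by simp [pvTok]]
            exact ih (d :: t') (by simp at h ⊢; omega)
      · have hstep : pvRep2 (c :: t) = c :: pvRep2 t := by
          cases t with
          | nil => rfl
          | cons d t' =>
            simp only [pvRep2]
            rw [if_neg (fun hp => hc hp.1)]
        rw [hstep]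
        have htw : '_' ∉ List.takeWhile pvQ t := by
          intro hm; have := List.mem_takeWhile_imp hm; simp [pvQ] at this
        have hdec : pvRep2 t = List.takeWhile pvQ t ++ pvRep2 (List.dropWhile pvQ t) := by
          conv_lhs => rw [← List.takeWhile_append_dropWhile (p := pvQ) (l := t)]
          exact pvRep2_append_left _ _ htw
        rcases pvDropWhile_shape t with hdw | ⟨r, hdw⟩
        · rw [hdw] at hdec
          simp [pvRep2] at hdec
          rw [hdec, ← List.takeWhile_append_dropWhile (p := pvQ) (l := t), hdw]
          simp [List.takeWhile_idem]
        · rw [hdw] at hdec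
          obtain ⟨x, hx⟩ := pvRep2_underscore_head r
          rw [hx] at hdec
          have hlen : (List.dropWhile pvQ t).length ≤ t.length := List.length_dropWhile_le ..
          rw [hdw] at hlen
          have hdwn : ('_' :: r).length ≤ n := by simp at hlen h ⊢; omega
          have e1 := pvTakeWhile_append_underscore (List.takeWhile pvQ t) x htw
          rw [hdec]
          rw [show pvTok (c :: (List.takeWhile pvQ t ++ '_' :: x))
              = (c :: List.takeWhile pvQ (List.takeWhile pvQ t ++ '_' :: x))
                :: pvTok (List.dropWhile pvQ (List.takeWhile pvQ t ++ '_' :: x)) by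
            simp [pvTok, hc]]
          rw [e1.1, e1.2, ← hx]
          rw [show pvTok (c :: t)
              = (c :: List.takeWhile pvQ t) :: pvTok (List.dropWhile pvQ t) by
            simp [pvTok, hc]]
          rw [hdw, ih ('_' :: r) hdwn]

theorem pvTok_rep2 (l : List Char) : pvTok (pvRep2 l) = pvTok l :=
  pvTok_rep2_aux l.length l le_rfl

theorem pvTok_ok (l : List Char) : ∀ t ∈ pvTok l, t ≠ [] ∧ '_' ∉ t := by
  induction l using pvTok.induct with
  | case1 => simp [pvTok]
  | case2 c t hc ih =>
    rw [show pvTok (c :: t) = pvTok t by simp [pvTok, hc]]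
    exact ih
  | case3 c t hc ih =>
    rw [show pvTok (c :: t) = (c :: List.takeWhile pvQ t) :: pvTok (List.dropWhile pvQ t) by
      simp [pvTok, hc]]
    intro x hx
    rcases List.mem_cons.mp hx with h1 | h1
    · subst h1
      refine ⟨by simp, ?_⟩
      intro hm
      rcases List.mem_cons.mp hm with h2 | h2
      · simp at hc; exact hc h2.symm
      · have := List.mem_takeWhile_imp h2; simp [pvQ] at this
    · exact ih x h1

theorem pvRstrip_cons_underscore (u : List Char) :
    pvRstrip ('_' :: u) = if pvRstrip u = [] then [] else '_' :: pvRstrip u := by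
  unfold pvRstrip
  rw [List.reverse_cons, List.dropWhile_append]
  split
  · rename_i hemp
    rw [List.isEmpty_iff] at hemp
    rw [show List.dropWhile (· == '_') ['_'] = [] by simp [List.dropWhile_cons]]
    simp [hemp]
  · rename_i hemp
    rw [List.isEmpty_iff] at hemp
    rw [if_neg (show ¬ (List.dropWhile (fun x => x == '_') u.reverse).reverse = [] by
      simpa using hemp)]
    simp

theorem pvDropWhile_underscore_eq_self (a : List Char) (ha : '_' ∉ a) :
    List.dropWhile (· == '_') a = a := by
  cases a with
  | nil => rfl
  | cons c a' =>
    have hc : ¬ c = '_' := fun h => ha (h ▸ List.mem_cons_self ..)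
    simp [List.dropWhile_cons, hc]

theorem pvRstrip_append_left (a b : List Char) (ha : '_' ∉ a) :
    pvRstrip (a ++ b) = a ++ pvRstrip b := by
  unfold pvRstrip
  rw [List.reverse_append, List.dropWhile_append]
  have hrev : List.dropWhile (· == '_') a.reverse = a.reverse :=
    pvDropWhile_underscore_eq_self a.reverse (by simpa using ha)
  split
  · rename_i hemp
    rw [List.isEmpty_iff] at hemp
    rw [hrev, hemp]
    simp
  · simp

theorem pvJoin_ne_nil (x : List Char) (xs : List (List Char)) (h : x ≠ []) :
    PySem.Chars.join ['_'] (x :: xs) ≠ [] := by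
  cases xs with
  | nil => rw [PySem.Chars.join_singleton]; exact h
  | cons y ys =>
    rw [PySem.Chars.join_cons_cons]
    simp

theorem pvDD_tail (c : Char) (t : List Char) (h : (['_','_'] : List Char) <:+: t) :
    (['_','_'] : List Char) <:+: (c :: t) := List.infix_cons h

theorem pvHead_ne_of_ndd (t : List Char) (h : ¬ (['_','_'] : List Char) <:+: ('_' :: t)) :
    t = [] ∨ ∃ d t', t = d :: t' ∧ ¬ d = '_' := by
  cases t with
  | nil => exact Or.inl rfl
  | cons d t' =>
    right
    refine ⟨d, t', rfl, ?_⟩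
    intro hd
    subst hd
    exact h (List.IsPrefix.isInfix ⟨t', rfl⟩)

theorem pvRstrip_char (n : Nat) : ∀ u : List Char, u.length ≤ n → ¬ (['_','_'] : List Char) <:+: u →
    pvRstrip u = if pvTok u = [] then []
      else (if u.head? = some '_' then ['_'] else []) ++ PySem.Chars.join ['_'] (pvTok u) := by
  induction n with
  | zero =>
    intro u h _
    have : u = [] := List.eq_nil_of_length_eq_zero (Nat.le_zero.mp h)
    subst this; simp [pvRstrip, pvTok]
  | succ n ih =>
    intro u h hdd
    cases u with
    | nil => simp [pvRstrip, pvTok]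
    | cons c t =>
      by_cases hc : c = '_'
      · subst hc
        rw [pvRstrip_cons_underscore]
        have hddt : ¬ (['_','_'] : List Char) <:+: t := fun hx => hdd (pvDD_tail _ _ hx)
        have iht := ih t (by simp at h; omega) hddt
        rw [show pvTok ('_' :: t) = pvTok t by simp [pvTok]]
        cases htok : pvTok t with
        | nil =>
          rw [htok] at iht
          simp at iht
          simp [iht]
        | cons x xs =>
          rw [htok] at iht
          have hth : ¬ t.head? = some '_' := by
            rcases pvHead_ne_of_ndd t hdd with h1 | ⟨d, t', h1, h2⟩
            · subst h1; simp
            · subst h1; simpa using fun hx => h2 hx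
          rw [if_neg (by simp), if_neg hth] at iht
          simp only [List.nil_append] at iht
          have hxne : x ≠ [] := (pvTok_ok t x (htok ▸ List.mem_cons_self ..)).1
          have hne : pvRstrip t ≠ [] := by
            rw [iht]; exact pvJoin_ne_nil x xs hxne
          rw [if_neg hne, if_neg (by simp), iht]
          simp
      · have hsplit : c :: t = (c :: List.takeWhile pvQ t) ++ List.dropWhile pvQ t := by
          simp [List.takeWhile_append_dropWhile]
        have htw : '_' ∉ c :: List.takeWhile pvQ t := by
          intro hm
          rcases List.mem_cons.mp hm with h1 | h1
          · exact hc h1.symm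
          · have := List.mem_takeWhile_imp h1; simp [pvQ] at this
        have htokc : pvTok (c :: t)
            = (c :: List.takeWhile pvQ t) :: pvTok (List.dropWhile pvQ t) := by
          simp [pvTok, hc]
        rw [hsplit, pvRstrip_append_left _ _ htw, ← hsplit, htokc]
        rcases pvDropWhile_shape t with hdw | ⟨r, hdw⟩
        · rw [hdw]
          simp [pvRstrip, pvTok, PySem.Chars.join_singleton, hc]
        · have hdddw : ¬ (['_','_'] : List Char) <:+: List.dropWhile pvQ t := by
            intro hx
            exact hdd (pvDD_tail c t (hx.trans (List.dropWhile_suffix pvQ).isInfix))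
          have hlen : (List.dropWhile pvQ t).length ≤ n := by
            have := List.length_dropWhile_le (p := pvQ) (l := t)
            simp at h; omega
          have ihdw := ih _ hlen hdddw
          rw [ihdw]
          cases htok : pvTok (List.dropWhile pvQ t) with
          | nil => simp [PySem.Chars.join_singleton, hc]
          | cons y ys => simp [hdw, PySem.Chars.join_cons_cons, hc]

theorem pvContains_underscore (c : Char) : ((['_'] : List Char).contains c) = (c == '_') := by
  cases h : c == '_' <;> simp_all

theorem pvStripChars_eq (y : List Char) :
    PySem.Chars.stripChars y ['_'] = pvRstrip (List.dropWhile (· == '_') y) := by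
  show (List.dropWhile (fun c => (['_'] : List Char).contains c)
      ((List.dropWhile (fun c => (['_'] : List Char).contains c) y).reverse)).reverse = _
  rw [show (fun c => (['_'] : List Char).contains c) = (fun c => c == '_') from
    funext fun c => pvContains_underscore c]
  rfl

theorem pvStrip_char (y : List Char) (h : ¬ (['_','_'] : List Char) <:+: y) :
    PySem.Chars.stripChars y ['_'] = PySem.Chars.join ['_'] (pvTok y) := by
  rw [pvStripChars_eq]
  cases y with
  | nil => simp [pvRstrip, pvTok, PySem.Chars.join_nil]
  | cons c t =>
    by_cases hc : c = '_'
    · subst hc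
      rw [show List.dropWhile (· == '_') ('_' :: t) = List.dropWhile (· == '_') t by
        simp [List.dropWhile_cons]]
      rw [show pvTok ('_' :: t) = pvTok t by simp [pvTok]]
      rcases pvHead_ne_of_ndd t h with h1 | ⟨d, t', h1, h2⟩
      · subst h1; simp [pvRstrip, pvTok, PySem.Chars.join_nil]
      · subst h1
        rw [show List.dropWhile (· == '_') (d :: t') = d :: t' by
          simp [List.dropWhile_cons, h2]]
        have hdd : ¬ (['_','_'] : List Char) <:+: (d :: t') :=
          fun hx => h (pvDD_tail _ _ hx)
        rw [pvRstrip_char (d :: t').length _ le_rfl hdd]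
        cases htok : pvTok (d :: t') with
        | nil => simp [PySem.Chars.join_nil]
        | cons x xs =>
          rw [if_neg (by simp), if_neg (by simpa using fun hx => h2 hx)]
          simp
    · rw [show List.dropWhile (· == '_') (c :: t) = c :: t by
        simp [List.dropWhile_cons, hc]]
      rw [pvRstrip_char (c :: t).length _ le_rfl h]
      rw [if_neg (by simp [pvTok, hc]), if_neg (by simpa using fun hx => hc hx)]
      simp

theorem pvCollapse_spec (s : String) :
    ¬ (['_','_'] : List Char) <:+: (pvCollapse s).toList ∧
      pvTok (pvCollapse s).toList = pvTok s.toList := by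
  induction s using pvCollapse.induct with
  | case1 s hin ih =>
    rw [pvCollapse, if_pos hin]
    refine ⟨ih.1, ih.2.trans ?_⟩
    rw [PySem.Str.toList_replace]
    rw [show ("__" : String).toList = ['_','_'] by decide]
    rw [show ("_" : String).toList = ['_'] by decide]
    rw [pvReplace_eq_rep2, pvTok_rep2]
  | case2 s hin =>
    rw [pvCollapse, if_neg hin]
    refine ⟨?_, rfl⟩
    have : PySem.Chars.isIn (("__" : String).toList) s.toList = false := by
      rw [← PySem.Str.isIn_eq]
      exact Bool.not_eq_true _ ▸ (by simpa using hin)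
    rw [show ("__" : String).toList = ['_','_'] by decide] at this
    exact (PySem.Chars.isIn_eq_false_iff _ _).mp this

theorem pvTok_all_q (r : List Char) (hfree : '_' ∉ r) : ∀ x ∈ r, pvQ x = true := by
  intro x hx
  simp [pvQ]
  intro hx'
  exact hfree (hx' ▸ hx)

theorem pvTok_join (ts : List (List Char)) (h : ∀ t ∈ ts, t ≠ [] ∧ '_' ∉ t) :
    pvTok (PySem.Chars.join ['_'] ts) = ts := by
  induction ts with
  | nil => simp [PySem.Chars.join_nil, pvTok]
  | cons r rest ih =>
    obtain ⟨hne, hfree⟩ := h r (List.mem_cons_self ..)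
    cases hr : r with
    | nil => exact absurd hr hne
    | cons c r' =>
      subst hr
      have hc : ¬ c = '_' := fun hx => hfree (hx ▸ List.mem_cons_self ..)
      have hfree' : '_' ∉ r' := fun hx => hfree (List.mem_cons_of_mem _ hx)
      cases rest with
      | nil =>
        rw [PySem.Chars.join_singleton]
        rw [show pvTok (c :: r') = (c :: List.takeWhile pvQ r') :: pvTok (List.dropWhile pvQ r') by
          simp [pvTok, hc]]
        rw [List.takeWhile_eq_self_iff.mpr (pvTok_all_q r' hfree'),
          List.dropWhile_eq_nil_iff.mpr (pvTok_all_q r' hfree')]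
        simp [pvTok]
      | cons r2 rs =>
        rw [PySem.Chars.join_cons_cons]
        have e1 := pvTakeWhile_append_underscore r' (PySem.Chars.join ['_'] (r2 :: rs)) hfree'
        rw [show (c :: r') ++ ['_'] ++ PySem.Chars.join ['_'] (r2 :: rs)
            = c :: (r' ++ '_' :: PySem.Chars.join ['_'] (r2 :: rs)) by simp]
        rw [show pvTok (c :: (r' ++ '_' :: PySem.Chars.join ['_'] (r2 :: rs)))
            = (c :: List.takeWhile pvQ (r' ++ '_' :: PySem.Chars.join ['_'] (r2 :: rs)))
              :: pvTok (List.dropWhile pvQ (r' ++ '_' :: PySem.Chars.join ['_'] (r2 :: rs))) by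
          simp [pvTok, hc]]
        rw [e1.1, e1.2]
        rw [show pvTok ('_' :: PySem.Chars.join ['_'] (r2 :: rs))
            = pvTok (PySem.Chars.join ['_'] (r2 :: rs)) by simp [pvTok]]
        rw [ih (fun t ht => h t (List.mem_cons_of_mem _ ht))]

theorem pvPair_infix_append (x y : Char) (a : List Char) : ∀ b, [x, y] <:+: a ++ b →
    [x, y] <:+: a ∨ [x, y] <:+: b ∨ (a.getLast? = some x ∧ b.head? = some y) := by
  induction a with
  | nil => intro b h; exact Or.inr (Or.inl h)
  | cons c a' ih =>
    intro b h
    rw [List.cons_append] at h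
    rcases List.infix_cons_iff.mp h with hpre | hinf
    · obtain ⟨u, hu⟩ := hpre
      simp only [List.cons_append, List.cons.injEq] at hu
      obtain ⟨hx, hu2⟩ := hu
      subst hx
      cases a' with
      | nil =>
        cases b with
        | nil => simp at hu2
        | cons e b' =>
          simp at hu2
          exact Or.inr (Or.inr ⟨by simp, by simp [hu2.1]⟩)
      | cons d a'' =>
        simp at hu2
        left
        exact List.IsPrefix.isInfix ⟨a'', by simp [hu2.1]⟩
    · rcases ih b hinf with h1 | h1 | ⟨h1, h2⟩
      · exact Or.inl (List.infix_cons h1)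
      · exact Or.inr (Or.inl h1)
      · have ha' : a' ≠ [] := by
          intro hx; subst hx; simp at h1
        refine Or.inr (Or.inr ⟨?_, h2⟩)
        rw [List.getLast?_cons, h1]
        simp

theorem pvJoin_head (r : List Char) (rest : List (List Char)) :
    (PySem.Chars.join ['_'] (r :: rest)).head? = if r = [] then (PySem.Chars.join ['_'] (r :: rest)).head? else r.head? := by
  cases rest with
  | nil => simp [PySem.Chars.join_singleton]
  | cons r2 rs =>
    rw [PySem.Chars.join_cons_cons]
    cases r with
    | nil => simp
    | cons c r' => simp

theorem pvNdd_join (ts : List (List Char)) (h : ∀ t ∈ ts, t ≠ [] ∧ '_' ∉ t) :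
    ¬ (['_','_'] : List Char) <:+: PySem.Chars.join ['_'] ts := by
  induction ts with
  | nil => intro hx; exact absurd hx.length_le (by simp [PySem.Chars.join_nil])
  | cons r rest ih =>
    obtain ⟨hne, hfree⟩ := h r (List.mem_cons_self ..)
    have hrest : ∀ t ∈ rest, t ≠ [] ∧ '_' ∉ t := fun t ht => h t (List.mem_cons_of_mem _ ht)
    cases rest with
    | nil =>
      rw [PySem.Chars.join_singleton]
      intro hx
      exact hfree (hx.subset (List.mem_cons_self ..))
    | cons r2 rs =>
      rw [PySem.Chars.join_cons_cons]
      intro hx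
      rw [show r ++ ['_'] ++ PySem.Chars.join ['_'] (r2 :: rs)
          = r ++ ('_' :: PySem.Chars.join ['_'] (r2 :: rs)) by simp] at hx
      rcases pvPair_infix_append '_' '_' r _ hx with h1 | h1 | ⟨h1, _⟩
      · exact hfree (h1.subset (List.mem_cons_self ..))
      · rcases List.infix_cons_iff.mp h1 with hpre | hinf
        · obtain ⟨u, hu⟩ := hpre
          simp only [List.cons_append, List.cons.injEq] at hu
          obtain ⟨r2ne, r2free⟩ := hrest r2 (List.mem_cons_self ..)
          have hh : (PySem.Chars.join ['_'] (r2 :: rs)).head? = r2.head? := by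
            rw [pvJoin_head, if_neg r2ne]
          cases hr2 : r2 with
          | nil => exact absurd hr2 r2ne
          | cons e r2' =>
            subst hr2
            have he : ¬ e = '_' := fun hx' => r2free (hx' ▸ List.mem_cons_self ..)
            have h2 : PySem.Chars.join ['_'] ((e :: r2') :: rs) = '_' :: u := by
              simpa using hu.2.symm
            have := congrArg List.head? h2
            rw [hh] at this
            simp at this
            exact he this
        · exact ih hrest hinf
      · exact hfree (List.mem_of_getLast? h1)

theorem pvPfx (a : List Char) : ∀ (c x : List Char), '_' ∉ a → '_' ∉ c →
    (x = [] ∨ x.head? = some '_') → a ++ ['_'] <+: c ++ x → a = c := by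
  induction a with
  | nil =>
    intro c x _ hc hx hp
    cases c with
    | nil => rfl
    | cons e c' =>
      exfalso
      obtain ⟨u, hu⟩ := hp
      simp at hu
      have he : e = '_' := hu.1.symm
      exact hc (show '_' ∈ e :: c' by rw [he]; exact List.mem_cons_self ..)
  | cons b a' ih =>
    intro c x ha hc hx hp
    have hb : ¬ b = '_' := fun h => ha (h ▸ List.mem_cons_self ..)
    have ha' : '_' ∉ a' := fun h => ha (List.mem_cons_of_mem _ h)
    cases c with
    | nil =>
      exfalso
      obtain ⟨u, hu⟩ := hp
      rcases hx with h1 | h1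
      · subst h1; simp at hu
      · cases x with
        | nil => simp at hu
        | cons e x' =>
          simp at h1 hu
          exact hb (hu.1 ▸ h1)
    | cons e c' =>
      obtain ⟨u, hu⟩ := hp
      simp at hu
      obtain ⟨hbe, hrest⟩ := hu
      subst hbe
      have hc' : '_' ∉ c' := fun h => hc (List.mem_cons_of_mem _ h)
      have : a' ++ ['_'] <+: c' ++ x := ⟨u, by simpa using hrest⟩
      rw [ih c' x ha' hc' hx this]

theorem pvScan (label P : String) (rest : List (List Char))
    (hlab : label.toList = PySem.Chars.join ['_'] (P.toList :: rest))
    (hfree : '_' ∉ P.toList) :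
    ∀ lst : List String, (∀ p ∈ lst, p.toList ≠ [] ∧ '_' ∉ p.toList) →
      pvFindPlant label lst = if P ∈ lst then some P else none := by
  intro lst hlst
  have hx : ∃ x, label.toList = P.toList ++ x ∧ (x = [] ∨ x.head? = some '_') := by
    cases rest with
    | nil =>
      refine ⟨[], ?_, Or.inl rfl⟩
      rw [hlab, PySem.Chars.join_singleton]
      simp
    | cons r2 rs =>
      refine ⟨'_' :: PySem.Chars.join ['_'] (r2 :: rs), ?_, Or.inr rfl⟩
      rw [hlab, PySem.Chars.join_cons_cons]
      simp
  obtain ⟨x, hlabx, hxprop⟩ := hx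
  have cond : ∀ p : String, p.toList ≠ [] → '_' ∉ p.toList →
      ((PySem.Str.startswith label (p ++ "_") || label == p) = true ↔ p = P) := by
    intro p hpne hpfree
    constructor
    · intro hb
      rcases Bool.or_eq_true_iff.mp hb with h1 | h1
      · rw [PySem.Str.startswith_eq] at h1
        have hsw := (PySem.Chars.startswith_iff _ _).mp h1
        rw [String.toList_append, show ("_" : String).toList = ['_'] by decide] at hsw
        rw [hlabx] at hsw
        exact String.ext (pvPfx p.toList P.toList x hpfree hfree hxprop hsw)
      · have hlp : label = p := eq_of_beq h1
        have hpl : p.toList = P.toList ++ x := by rw [← hlp, hlabx]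
        rcases hxprop with h2 | h2
        · subst h2
          exact String.ext (by simpa using hpl)
        · exfalso
          cases x with
          | nil => simp at h2
          | cons e x' =>
            simp at h2
            exact hpfree (hpl ▸ List.mem_append_right _ (h2 ▸ List.mem_cons_self ..))
    · intro hp
      subst hp
      rcases hxprop with h2 | h2
      · subst h2
        have : label = p := String.ext (by simpa using hlabx)
        rw [this]
        simp
      · cases x with
        | nil => simp at h2
        | cons e x' =>
          simp at h2
          subst h2
          have : PySem.Str.startswith label (p ++ "_") = true := by
            rw [PySem.Str.startswith_eq]
            apply (PySem.Chars.startswith_iff _ _).mpr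
            rw [String.toList_append, show ("_" : String).toList = ['_'] by decide, hlabx]
            exact ⟨x', by simp⟩
          rw [this]
          simp
  induction lst with
  | nil => simp [pvFindPlant]
  | cons p ps ih =>
    obtain ⟨hpne, hpfree⟩ := hlst p (List.mem_cons_self ..)
    rw [pvFindPlant]
    by_cases hpP : p = P
    · subst hpP
      rw [if_pos ((cond p hpne hpfree).mpr rfl)]
      rw [if_pos (List.mem_cons_self ..)]
    · have hcf : ¬ (PySem.Str.startswith label (p ++ "_") || label == p) = true :=
        fun hb => hpP ((cond p hpne hpfree).mp hb)
      rw [if_neg hcf, ih (fun q hq => hlst q (List.mem_cons_of_mem _ hq))]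
      have : (P ∈ p :: ps) ↔ (P ∈ ps) := by
        simp [List.mem_cons]
        intro h'; exact absurd h'.symm hpP
      by_cases hPps : P ∈ ps
      · rw [if_pos hPps, if_pos (this.mpr hPps)]
      · rw [if_neg hPps, if_neg (fun hm => hPps (this.mp hm))]

theorem pvFindPlant_empty : ∀ lst : List String, (∀ p ∈ lst, p.toList ≠ []) →
    pvFindPlant "" lst = none := by
  intro lst hlst
  induction lst with
  | nil => rfl
  | cons p ps ih =>
    have hpne := hlst p (List.mem_cons_self ..)
    rw [pvFindPlant]
    rw [if_neg ?_]
    · exact ih (fun q hq => hlst q (List.mem_cons_of_mem _ hq))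
    · intro hb
      rcases Bool.or_eq_true_iff.mp hb with h1 | h1
      · rw [PySem.Str.startswith_eq] at h1
        have hsw := (PySem.Chars.startswith_iff _ _).mp h1
        rw [String.toList_append] at hsw
        have := hsw.length_le
        rw [show ("" : String).toList = [] by decide] at this
        simp [show ("_" : String).toList = ['_'] by decide] at this
      · have : ("" : String) = p := eq_of_beq h1
        exact hpne (by rw [← this]; decide)

theorem pvToList_ne_nil_iff (t : String) : (t.toList ≠ []) ↔ (t ≠ "") := by
  constructor
  · intro h hs; exact h (by rw [hs]; decide)
  · intro h hl
    exact h (String.ext (by rw [hl]; decide))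

theorem pvPrefix_facts : ∀ p ∈ pvPlantPrefixes, p.toList ≠ [] ∧ '_' ∉ p.toList := by decide

theorem pvMain (class_name : String) :
    parse_general_disease_class_name class_name = parse_general_disease_class_name_alt class_name := by
  unfold parse_general_disease_class_name parse_general_disease_class_name_alt pvCleanLabel
  generalize PySem.Str.replace (PySem.Str.replace (PySem.Str.replace (PySem.Str.replace
    (PySem.Str.replace class_name "___" "_") "," "") "(" "") ")" "") " " "_" = s0
  dsimp only
  obtain ⟨hdd, htokeq⟩ := pvCollapse_spec s0
  have hlabel : (PySem.Str.stripChars (pvCollapse s0) "_").toList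
      = PySem.Chars.join ['_'] (pvTok s0.toList) := by
    rw [PySem.Str.toList_stripChars, show ("_" : String).toList = ['_'] by decide]
    rw [pvStrip_char _ hdd, htokeq]
  have h1 := PySem.Str.split?_map s0 "_"
  rw [show ("_" : String).toList = ['_'] by decide] at h1
  have h2 : PySem.Chars.split? s0.toList ['_'] = some (pvSplitU s0.toList) := by
    rw [show PySem.Chars.split? s0.toList ['_']
        = some (PySem.Chars.splitOn s0.toList ['_']) from by simp [PySem.Chars.split?]]
    rw [pvSplitOn_eq]
  rw [h2] at h1
  cases hsp : PySem.Str.split? s0 "_" with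
  | none => rw [hsp] at h1; simp at h1
  | some parts =>
    rw [hsp] at h1
    simp only [Option.map_some, Option.some.injEq] at h1
    simp only [Option.getD_some]
    have htokens : (parts.filter (fun t => t ≠ "")).map String.toList = pvTok s0.toList := by
      rw [← pvFilter_splitU, ← h1, List.filter_map]
      congr 1
      apply List.filter_congr
      intro t _
      simp only [Function.comp_apply]
      exact decide_eq_decide.mpr ((pvToList_ne_nil_iff t).symm)
    cases htk : pvTok s0.toList with
    | nil =>
      rw [htk] at htokens hlabel
      have htkn : parts.filter (fun t => t ≠ "") = [] := List.map_eq_nil_iff.mp htokens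
      rw [htkn]
      have hlab0 : PySem.Str.stripChars (pvCollapse s0) "_" = "" := by
        apply String.ext
        rw [hlabel, PySem.Chars.join_nil]
        decide
      rw [hlab0, pvFindPlant_empty pvPlantPrefixes (fun p hp => (pvPrefix_facts p hp).1)]
    | cons t0 rest =>
      rw [htk] at htokens hlabel
      obtain ⟨P, R, htkc, hP, hR⟩ := List.map_eq_cons_iff.mp htokens
      rw [htkc]
      dsimp only
      have hok := pvTok_ok s0.toList
      rw [htk] at hok
      have ht0 := hok t0 (List.mem_cons_self ..)
      have hrestok : ∀ t ∈ rest, t ≠ [] ∧ '_' ∉ t :=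
        fun t ht => hok t (List.mem_cons_of_mem _ ht)
      have hlabP : (PySem.Str.stripChars (pvCollapse s0) "_").toList
          = PySem.Chars.join ['_'] (P.toList :: rest) := by rw [hlabel, hP]
      have hPfree : '_' ∉ P.toList := by rw [hP]; exact ht0.2
      have hscan := pvScan _ P rest hlabP hPfree pvPlantPrefixes pvPrefix_facts
      by_cases hPm : P ∈ pvPlantPrefixes
      · have hgf : (P == "unknown" || !(pvPlantDict.contains P)) = false := by
          rw [pvPlantPrefixes, List.mem_filter] at hPm
          apply Bool.or_eq_false_iff.mpr
          constructor
          · have := hPm.2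
            simp at this
            simpa using this
          · have := (PySem.Dict.contains_iff_mem_keys (d := pvPlantDict) (k := P)).mpr hPm.1
            simp [this]
        rw [hscan, if_pos hPm]
        dsimp only
        rw [hgf]
        simp only [Bool.false_eq_true, if_false]
        have hdp : (PySem.Str.stripChars
            (PySem.Str.slice (PySem.Str.stripChars (pvCollapse s0) "_") (some (PySem.Str.len P)) none) "_").toList
            = PySem.Chars.join ['_'] rest := by
          rw [PySem.Str.toList_stripChars, show ("_" : String).toList = ['_'] by decide]
          rw [PySem.Str.toList_slice, PySem.Chars.slice_eq_listSlice, PySem.Str.len_eq]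
          rw [PySem.List.slice_from _ (by positivity)]
          rw [show ((P.toList.length : Int)).toNat = P.toList.length by simp]
          rw [hlabP]
          cases rest with
          | nil =>
            rw [PySem.Chars.join_singleton, PySem.Chars.join_nil, List.drop_length]
            rfl
          | cons r2 rs =>
            rw [PySem.Chars.join_cons_cons]
            rw [show P.toList ++ ['_'] ++ PySem.Chars.join ['_'] (r2 :: rs)
                = P.toList ++ ('_' :: PySem.Chars.join ['_'] (r2 :: rs)) by simp]
            rw [List.drop_left]
            have hndd : ¬ (['_','_'] : List Char) <:+: ('_' :: PySem.Chars.join ['_'] (r2 :: rs)) := by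
              intro hx
              rcases List.infix_cons_iff.mp hx with hpre | hinf
              · obtain ⟨u, hu⟩ := hpre
                simp only [List.cons_append, List.cons.injEq] at hu
                obtain ⟨r2ne, r2free⟩ := hrestok r2 (List.mem_cons_self ..)
                have hh : (PySem.Chars.join ['_'] (r2 :: rs)).head? = r2.head? := by
                  rw [pvJoin_head, if_neg r2ne]
                have h3 : (PySem.Chars.join ['_'] (r2 :: rs)).head? = some '_' := by
                  rw [show PySem.Chars.join ['_'] (r2 :: rs) = '_' :: ([] ++ u) from hu.2.symm]
                  simp
                rw [hh] at h3
                cases hr2 : r2 with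
                | nil => exact r2ne hr2
                | cons e r2' =>
                  rw [hr2] at h3
                  simp at h3
                  exact r2free (by rw [hr2, h3]; exact List.mem_cons_self ..)
              · exact pvNdd_join (r2 :: rs) hrestok hinf
            rw [pvStrip_char _ hndd]
            rw [show pvTok ('_' :: PySem.Chars.join ['_'] (r2 :: rs))
                = pvTok (PySem.Chars.join ['_'] (r2 :: rs)) by simp [pvTok]]
            rw [pvTok_join (r2 :: rs) hrestok]
        have hjoinB : (PySem.Str.join "_" R).toList = PySem.Chars.join ['_'] rest := by
          rw [PySem.Str.toList_join, show ("_" : String).toList = ['_'] by decide, hR]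
        have hdpeq : PySem.Str.stripChars
            (PySem.Str.slice (PySem.Str.stripChars (pvCollapse s0) "_") (some (PySem.Str.len P)) none) "_"
            = PySem.Str.join "_" R := String.ext (hdp.trans hjoinB.symm)
        rw [hdpeq]
      · have hgt : (P == "unknown" || !(pvPlantDict.contains P)) = true := by
          by_contra hb
          have hgf := Bool.eq_false_iff.mpr hb
          apply hPm
          rw [pvPlantPrefixes, List.mem_filter]
          have h1' := (Bool.or_eq_false_iff.mp hgf).1
          have h2' := (Bool.or_eq_false_iff.mp hgf).2
          refine ⟨(PySem.Dict.contains_iff_mem_keys (d := pvPlantDict) (k := P)).mp (by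
            simpa using h2'), by simpa using h1'⟩
        rw [hscan, if_neg hPm]
        dsimp only
        rw [hgt]
        simp

-- ===== VERDICT (by name: the statement is the Claim_ definition above) =====
theorem parse_general_disease_class_name_spec : Claim_equal_parse_general_disease_class_name := by
  intro class_name _
  unfold Spec_parse_general_disease_class_name
  exact pvMain class_name
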